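-- pv_equiv track=rewrite | github.com/vlad-marlo/algorithms | school/mr/may/05/7827.py | solution
-- ===== SOURCE A (Python) =====
-- def get_maxes(data: list[int], even: bool) -> list[int]:
--     res = []
--     if (data[0] % 2 == 0) == even:
--         res.append(data[0])
--     else:
--         res.append(0)
--     for i in data[1:]:
--         res.append(max(res[-1], i if (i % 2 == 0) == even else 0))
--     return res
--
-- def solution(k: int, data: list[int]) -> int:
--     forwards_odd = get_maxes(data, False)
--     forwards_even = get_maxes(data, True)
--     backwards_odd = get_maxes(data[::-1], False)[::-1]
--     backwards_even = get_maxes(data[::-1], True)[::-1]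
--     mx = 0
--     for i in range(len(data)-k):
--         mx = max(mx, forwards_odd[i]+backwards_even[i+k])
--         mx = max(mx, forwards_even[i]+backwards_odd[i+k])
--     return mx
-- ===== SOURCE B (Python) =====
-- def solution(k: int, data: list[int]) -> int:
--     # Pair reformulation: the answer is the max of 0 and o_p + e_q / e_p + o_q over all
--     # index pairs with p + k <= q (o_x/e_x = the value if its parity matches, else 0),
--     # computed in one array-free sweep with a k-delayed running maximum.
--     mx = 0
--     ce = co = None
--     for q in range(k, len(data)):
--         v = data[q - k]
--         ve = v if v % 2 == 0 else 0
--         vo = v if v % 2 != 0 else 0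
--         ce = ve if ce is None else max(ce, ve)
--         co = vo if co is None else max(co, vo)
--         w = data[q]
--         we = w if w % 2 == 0 else 0
--         wo = w if w % 2 != 0 else 0
--         mx = max(mx, co + we, ce + wo)
--     return mx
-- ===== Notes on version B (the rewrite author's own statement) =====
-- stated objective: faster
-- what changed: A builds four n-element prefix/suffix parity-maxima arrays (via four get_maxes passes, two over slice-reversed copies) and then a combine loop over them; B reformulates the answer as a maximum over element PAIRS with index gap >= k and computes it in a single array-free sweep that pairs data[q] with a k-delayed running maximum of data[q-k], building no lists at all.
import Mathlib
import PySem

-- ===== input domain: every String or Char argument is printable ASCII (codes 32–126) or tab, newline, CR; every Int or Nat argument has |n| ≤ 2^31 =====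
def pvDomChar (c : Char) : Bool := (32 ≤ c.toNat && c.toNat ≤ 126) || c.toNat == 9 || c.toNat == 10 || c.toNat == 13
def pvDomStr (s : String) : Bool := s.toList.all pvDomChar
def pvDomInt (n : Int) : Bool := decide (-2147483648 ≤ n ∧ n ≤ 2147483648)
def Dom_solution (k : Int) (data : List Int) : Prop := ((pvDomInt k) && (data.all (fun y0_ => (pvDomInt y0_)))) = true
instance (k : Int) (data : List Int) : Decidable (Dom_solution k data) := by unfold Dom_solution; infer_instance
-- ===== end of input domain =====

-- B reformulates the answer as a maximum over element pairs with index gap ≥ k and computes it in one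
-- array-free sweep with a k-delayed running maximum, instead of A's four prefix/suffix maxima arrays.

-- ===== PORT A =====
def getMaxes (data : List Int) (even : Bool) : List Int :=
  match data with
  | [] => []
  | d0 :: rest =>
    rest.foldl
      (fun res i =>
        res ++ [max (PySem.List.pyGetD res (-1) 0)
                    (if (PySem.Int.mod i 2 == 0) == even then i else 0)])
      [if (PySem.Int.mod d0 2 == 0) == even then d0 else 0]

def solution (k : Int) (data : List Int) : Int :=
  let forwards_odd := getMaxes data false
  let forwards_even := getMaxes data true
  let backwards_odd := (getMaxes data.reverse false).reverse
  let backwards_even := (getMaxes data.reverse true).reverse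
  (PySem.List.pyRange 0 (PySem.List.len data - k) 1).foldl
    (fun mx i =>
      let mx := max mx (PySem.List.pyGetD forwards_odd i 0 + PySem.List.pyGetD backwards_even (i + k) 0)
      max mx (PySem.List.pyGetD forwards_even i 0 + PySem.List.pyGetD backwards_odd (i + k) 0))
    0

-- ===== PORT B =====
def solution_alt (k : Int) (data : List Int) : Int :=
  ((PySem.List.pyRange k (PySem.List.len data) 1).foldl
    (fun (st : Int × Option Int × Option Int) q =>
      let mx := st.1; let ce := st.2.1; let co := st.2.2
      let v := PySem.List.pyGetD data (q - k) 0
      let ve := if PySem.Int.mod v 2 == 0 then v else 0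
      let vo := if PySem.Int.mod v 2 != 0 then v else 0
      let ce' := match ce with | none => ve | some c => max c ve
      let co' := match co with | none => vo | some c => max c vo
      let w := PySem.List.pyGetD data q 0
      let we := if PySem.Int.mod w 2 == 0 then w else 0
      let wo := if PySem.Int.mod w 2 != 0 then w else 0
      (max (max mx (co' + we)) (ce' + wo), some ce', some co'))
    ((0 : Int), (none : Option Int), (none : Option Int))).1

-- ===== PRECONDITION & SPEC =====
-- Pre_ excludes exactly the inputs on which Python A raises IndexError: empty data (data[0] in
-- get_maxes) and negative k (the loop then indexes forwards_odd[i] with i up to len(data)-k-1 ≥ len(data)).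
def Pre_solution (k : Int) (data : List Int) : Prop := data ≠ [] ∧ 0 ≤ k
instance (k : Int) (data : List Int) : Decidable (Pre_solution k data) := by unfold Pre_solution; infer_instance
def pvWitness_solution : Int × List Int := (1, [2, 3, 5, 4])
def Spec_solution (k : Int) (data : List Int) (out : Int) : Prop := out = solution_alt k data
instance (k : Int) (data : List Int) (out : Int) : Decidable (Spec_solution k data out) := by unfold Spec_solution; infer_instance

-- ===== CLAIM (what is proved, stated in full; the proofs are below) =====
def Claim_equal_solution : Prop := ∀ (k : Int) (data : List Int), Dom_solution k data → Pre_solution k data → Spec_solution k data (solution k data)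

-- ===== LEMMAS AND PROOFS =====

def pvPe (x : Int) : Int := if PySem.Int.mod x 2 == 0 then x else 0
def pvPo (x : Int) : Int := if PySem.Int.mod x 2 != 0 then x else 0

def pvScan (p : Int → Int) (a : Int) : List Int → List Int
  | [] => [a]
  | x :: xs => a :: pvScan p (max a (p x)) xs

lemma pvScan_length (p : Int → Int) : ∀ (xs : List Int) (a : Int), (pvScan p a xs).length = xs.length + 1 := by
  intro xs
  induction xs with
  | nil => intro a; rfl
  | cons x xs ih => intro a; simp [pvScan, ih]

lemma pvFoldAppend (p : Int → Int) : ∀ (xs res : List Int) (a : Int),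
    xs.foldl (fun res i => res ++ [max (PySem.List.pyGetD res (-1) 0) (p i)]) (res ++ [a])
      = res ++ pvScan p a xs := by
  intro xs
  induction xs with
  | nil => intro res a; simp [pvScan]
  | cons x xs ih =>
    intro res a
    simp only [List.foldl_cons, PySem.List.pyGetD_neg_one_append_singleton, pvScan]
    rw [ih (res ++ [a]) (max a (p x)), List.append_assoc]
    rfl

lemma pvScan_getD_zero (p : Int → Int) (a : Int) (xs : List Int) : (pvScan p a xs).getD 0 0 = a := by
  cases xs <;> rfl

lemma pvScan_getD_succ (p : Int → Int) : ∀ (xs : List Int) (a : Int) (j : Nat), j < xs.length →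
    (pvScan p a xs).getD (j + 1) 0 = max ((pvScan p a xs).getD j 0) (p (xs.getD j 0)) := by
  intro xs
  induction xs with
  | nil => intro a j h; simp at h
  | cons x xs ih =>
    intro a j h
    cases j with
    | zero =>
      simp only [pvScan, List.getD_cons_succ, List.getD_cons_zero]
      rw [show (pvScan p (max a (p x)) xs).getD 0 0 = max a (p x) from pvScan_getD_zero p _ xs]
    | succ j =>
      simp only [pvScan, List.getD_cons_succ]
      exact ih (max a (p x)) j (by simpa using h)

lemma pvPe_eqA (v : Int) : (if (PySem.Int.mod v 2 == 0) == true then v else 0) = pvPe v := by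
  simp [pvPe]

lemma pvPo_eqA (v : Int) : (if (PySem.Int.mod v 2 == 0) == false then v else 0) = pvPo v := by
  simp [pvPo, bne]

lemma getMaxes_true (d0 : Int) (rest : List Int) :
    getMaxes (d0 :: rest) true = pvScan pvPe (pvPe d0) rest := by
  have := pvFoldAppend pvPe rest [] (pvPe d0)
  simp only [List.nil_append] at this
  rw [getMaxes]
  simp only [pvPe_eqA]
  exact this

lemma getMaxes_false (d0 : Int) (rest : List Int) :
    getMaxes (d0 :: rest) false = pvScan pvPo (pvPo d0) rest := by
  have := pvFoldAppend pvPo rest [] (pvPo d0)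
  simp only [List.nil_append] at this
  rw [getMaxes]
  simp only [pvPo_eqA]
  exact this

-- running maximum of f over indices 0..j
def pvMaxTo (f : Nat → Int) : Nat → Int
  | 0 => f 0
  | j + 1 => max (pvMaxTo f j) (f (j + 1))

lemma pvMaxTo_mono (f : Nat → Int) {i j : Nat} (h : i ≤ j) : pvMaxTo f i ≤ pvMaxTo f j := by
  induction h with
  | refl => exact le_refl _
  | step _ ih => exact le_trans ih (le_max_left _ _)

lemma pvMaxTo_self (f : Nat → Int) (i : Nat) : f i ≤ pvMaxTo f i := by
  cases i with
  | zero => exact le_refl _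
  | succ j => exact le_max_right _ _

lemma pvMaxTo_ge (f : Nat → Int) {i j : Nat} (h : i ≤ j) : f i ≤ pvMaxTo f j :=
  le_trans (pvMaxTo_self f i) (pvMaxTo_mono f h)

lemma pvMaxTo_attained (f : Nat → Int) : ∀ j : Nat, ∃ u : Nat, u ≤ j ∧ pvMaxTo f j = f u := by
  intro j
  induction j with
  | zero => exact ⟨0, le_refl _, rfl⟩
  | succ j ih =>
    obtain ⟨u, hu, he⟩ := ih
    rcases le_total (pvMaxTo f j) (f (j + 1)) with h | h
    · exact ⟨j + 1, le_refl _, max_eq_right h⟩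
    · exact ⟨u, le_trans hu (Nat.le_succ j), by rw [pvMaxTo, max_eq_left h, he]⟩

lemma pvMaxTo_pred (f : Nat → Int) (t : Nat) (h : 1 ≤ t) :
    pvMaxTo f t = max (pvMaxTo f (t - 1)) (f t) := by
  cases t with
  | zero => omega
  | succ s => simp [pvMaxTo]

def pvFoldMax (f : Nat → Int) (z : Int) (m : Nat) : Int :=
  (List.range m).foldl (fun a i => max a (f i)) z

lemma pvFoldMax_succ (f : Nat → Int) (z : Int) (m : Nat) :
    pvFoldMax f z (m + 1) = max (pvFoldMax f z m) (f m) := by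
  simp [pvFoldMax, List.range_succ]

lemma pvFoldMax_ge_init (f : Nat → Int) (z : Int) (m : Nat) : z ≤ pvFoldMax f z m := by
  induction m with
  | zero => exact le_refl _
  | succ m ih => rw [pvFoldMax_succ]; exact le_trans ih (le_max_left _ _)

lemma pvFoldMax_ge (f : Nat → Int) (z : Int) {i m : Nat} (h : i < m) : f i ≤ pvFoldMax f z m := by
  induction m with
  | zero => omega
  | succ m ih =>
    rw [pvFoldMax_succ]
    rcases Nat.lt_succ_iff_lt_or_eq.mp h with h' | h'
    · exact le_trans (ih h') (le_max_left _ _)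
    · subst h'; exact le_max_right _ _

lemma pvFoldMax_le (f : Nat → Int) {z w : Int} {m : Nat} (hz : z ≤ w) (h : ∀ i, i < m → f i ≤ w) :
    pvFoldMax f z m ≤ w := by
  induction m with
  | zero => exact hz
  | succ m ih =>
    rw [pvFoldMax_succ]
    exact max_le (ih (fun i hi => h i (Nat.lt_succ_of_lt hi))) (h m (Nat.lt_succ_self m))

lemma pvFoldMax_congr (f g : Nat → Int) (z : Int) (m : Nat) (h : ∀ i, i < m → f i = g i) :
    pvFoldMax f z m = pvFoldMax g z m := by
  induction m with
  | zero => rfl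
  | succ m ih =>
    rw [pvFoldMax_succ, pvFoldMax_succ, ih (fun i hi => h i (Nat.lt_succ_of_lt hi)),
        h m (Nat.lt_succ_self m)]

-- the core identity: pairing each prefix maximum with the SUFFIX maximum on the other side
-- (A) gives the same overall maximum as pairing it with the single mirrored VALUE (B)
lemma pvCore (F F' G G' : Nat → Int) (m : Nat) :
    pvFoldMax (fun i => max (pvMaxTo F i + pvMaxTo G (m - 1 - i)) (pvMaxTo F' i + pvMaxTo G' (m - 1 - i))) 0 m
      = pvFoldMax (fun i => max (pvMaxTo F i + G (m - 1 - i)) (pvMaxTo F' i + G' (m - 1 - i))) 0 m := by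
  apply le_antisymm
  · apply pvFoldMax_le _ (pvFoldMax_ge_init _ 0 m)
    intro i hi
    apply max_le
    · obtain ⟨u, hu, he⟩ := pvMaxTo_attained G (m - 1 - i)
      have h1 : m - 1 - (m - 1 - u) = u := by omega
      calc pvMaxTo F i + pvMaxTo G (m - 1 - i) = pvMaxTo F i + G u := by rw [he]
        _ ≤ pvMaxTo F (m - 1 - u) + G (m - 1 - (m - 1 - u)) := by
              rw [h1]; exact add_le_add (pvMaxTo_mono F (by omega)) (le_refl _)
        _ ≤ max (pvMaxTo F (m - 1 - u) + G (m - 1 - (m - 1 - u)))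
              (pvMaxTo F' (m - 1 - u) + G' (m - 1 - (m - 1 - u))) := le_max_left _ _
        _ ≤ _ := pvFoldMax_ge _ 0 (show m - 1 - u < m by omega)
    · obtain ⟨u, hu, he⟩ := pvMaxTo_attained G' (m - 1 - i)
      have h1 : m - 1 - (m - 1 - u) = u := by omega
      calc pvMaxTo F' i + pvMaxTo G' (m - 1 - i) = pvMaxTo F' i + G' u := by rw [he]
        _ ≤ pvMaxTo F' (m - 1 - u) + G' (m - 1 - (m - 1 - u)) := by
              rw [h1]; exact add_le_add (pvMaxTo_mono F' (by omega)) (le_refl _)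
        _ ≤ max (pvMaxTo F (m - 1 - u) + G (m - 1 - (m - 1 - u)))
              (pvMaxTo F' (m - 1 - u) + G' (m - 1 - (m - 1 - u))) := le_max_right _ _
        _ ≤ _ := pvFoldMax_ge _ 0 (show m - 1 - u < m by omega)
  · apply pvFoldMax_le _ (pvFoldMax_ge_init _ 0 m)
    intro i hi
    apply le_trans _ (pvFoldMax_ge _ 0 hi)
    exact max_le
      (le_trans (add_le_add (le_refl _) (pvMaxTo_ge G (le_refl (m - 1 - i)))) (le_max_left _ _))
      (le_trans (add_le_add (le_refl _) (pvMaxTo_ge G' (le_refl (m - 1 - i)))) (le_max_right _ _))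

lemma pvScan_getD_eq (p : Int → Int) (d0 : Int) (rest : List Int) :
    ∀ j : Nat, j < (d0 :: rest).length →
      (pvScan p (p d0) rest).getD j 0 = pvMaxTo (fun u => p ((d0 :: rest).getD u 0)) j := by
  intro j
  induction j with
  | zero => intro _; rw [pvScan_getD_zero]; rfl
  | succ j ih =>
    intro h
    rw [pvScan_getD_succ p rest (p d0) j (by simpa using h), ih (by omega), pvMaxTo]
    rfl

lemma pvGetD_reverse (l : List Int) (j : Nat) (h : j < l.length) :
    l.reverse.getD j 0 = l.getD (l.length - 1 - j) 0 := by
  rw [List.getD_eq_getElem?_getD, List.getD_eq_getElem?_getD, List.getElem?_reverse h]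

lemma pvBstep (kn : Nat) (data : List Int) :
    ∀ (c t : Nat) (mx : Int), 1 ≤ t →
    ((PySem.List.pyRange (↑(kn + t)) (↑(kn + t) + ↑c) 1).foldl
        (fun (st : Int × Option Int × Option Int) q =>
          let mx := st.1; let ce := st.2.1; let co := st.2.2
          let v := PySem.List.pyGetD data (q - ↑kn) 0
          let ve := if PySem.Int.mod v 2 == 0 then v else 0
          let vo := if PySem.Int.mod v 2 != 0 then v else 0
          let ce' := match ce with | none => ve | some c => max c ve
          let co' := match co with | none => vo | some c => max c vo
          let w := PySem.List.pyGetD data q 0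
          let we := if PySem.Int.mod w 2 == 0 then w else 0
          let wo := if PySem.Int.mod w 2 != 0 then w else 0
          (max (max mx (co' + we)) (ce' + wo), some ce', some co'))
        (mx, some (pvMaxTo (fun u => pvPe (data.getD u 0)) (t - 1)),
             some (pvMaxTo (fun u => pvPo (data.getD u 0)) (t - 1)))).1
      = (List.range' t c).foldl
          (fun a u =>
            max a (max (pvMaxTo (fun u => pvPo (data.getD u 0)) u + pvPe (data.getD (kn + u) 0))
                       (pvMaxTo (fun u => pvPe (data.getD u 0)) u + pvPo (data.getD (kn + u) 0)))) mx := by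
  intro c
  induction c with
  | zero =>
    intro t mx ht
    rw [PySem.List.pyRange_one_eq_nil (by push_cast; omega)]
    rfl
  | succ c ih =>
    intro t mx ht
    rw [PySem.List.pyRange_one_cons (by push_cast; omega), List.foldl_cons]
    have e1 : (↑(kn + t) : Int) - ↑kn = ↑t := by push_cast; ring
    have e2 : (↑(kn + t) : Int) + 1 = ↑(kn + (t + 1)) := by push_cast; ring
    have e3 : (↑(kn + t) : Int) + ↑(c + 1) = ↑(kn + (t + 1)) + ↑c := by push_cast; ring
    simp only [e1, PySem.List.pyGetD_natCast, e2, e3]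
    rw [show (max (pvMaxTo (fun u => pvPe (data.getD u 0)) (t - 1)) (if PySem.Int.mod (data.getD t 0) 2 == 0 then data.getD t 0 else 0))
          = pvMaxTo (fun u => pvPe (data.getD u 0)) ((t + 1) - 1) from by
        rw [Nat.add_sub_cancel, pvMaxTo_pred _ t ht]; rfl]
    rw [show (max (pvMaxTo (fun u => pvPo (data.getD u 0)) (t - 1)) (if PySem.Int.mod (data.getD t 0) 2 != 0 then data.getD t 0 else 0))
          = pvMaxTo (fun u => pvPo (data.getD u 0)) ((t + 1) - 1) from by
        rw [Nat.add_sub_cancel, pvMaxTo_pred _ t ht]; rfl]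
    rw [ih (t + 1) _ (by omega), List.range'_succ, List.foldl_cons]
    congr 1
    rw [Nat.add_sub_cancel]
    rw [show pvMaxTo (fun u => pvPo (data.getD u 0)) t + pvPe (data.getD (kn + t) 0)
          = pvMaxTo (fun u => pvPo (data.getD u 0)) t + (if PySem.Int.mod (data.getD (kn + t) 0) 2 == 0 then data.getD (kn + t) 0 else 0) from rfl]
    rw [show pvMaxTo (fun u => pvPe (data.getD u 0)) t + pvPo (data.getD (kn + t) 0)
          = pvMaxTo (fun u => pvPe (data.getD u 0)) t + (if PySem.Int.mod (data.getD (kn + t) 0) 2 != 0 then data.getD (kn + t) 0 else 0) from rfl]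
    rw [max_assoc]

lemma pvBval (kn : Nat) (data : List Int) (hkn : kn < data.length) :
    solution_alt (↑kn) data
      = pvFoldMax (fun i =>
          max (pvMaxTo (fun u => pvPo (data.getD u 0)) i + pvPe (data.getD (kn + i) 0))
              (pvMaxTo (fun u => pvPe (data.getD u 0)) i + pvPo (data.getD (kn + i) 0)))
          0 (data.length - kn) := by
  simp only [solution_alt, PySem.List.len_eq]
  rw [PySem.List.pyRange_one_cons (by exact_mod_cast hkn), List.foldl_cons]
  have e0 : (↑kn : Int) - ↑kn = 0 := sub_self _
  simp only [e0, PySem.List.pyGetD_zero, PySem.List.pyGetD_natCast]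
  rw [show ((↑kn : Int) + 1) = ↑(kn + 1) from by push_cast; ring,
      show ((data.length : Int)) = (↑(kn + 1) + ↑(data.length - kn - 1) : Int) from by push_cast; omega]
  rw [show (if PySem.Int.mod (data.getD 0 0) 2 == 0 then data.getD 0 0 else 0)
        = pvMaxTo (fun u => pvPe (data.getD u 0)) (1 - 1) from rfl]
  rw [show (if PySem.Int.mod (data.getD 0 0) 2 != 0 then data.getD 0 0 else 0)
        = pvMaxTo (fun u => pvPo (data.getD u 0)) (1 - 1) from rfl]
  rw [pvBstep kn data (data.length - kn - 1) 1 _ (le_refl 1)]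
  rw [show data.length - kn = (data.length - kn - 1) + 1 from by omega]
  rw [pvFoldMax, List.range_eq_range', List.range'_succ, List.foldl_cons]
  congr 1
  rw [show pvMaxTo (fun u => pvPo (data.getD u 0)) 0 + pvPe (data.getD (kn + 0) 0)
        = pvPo (data.getD 0 0) + (if PySem.Int.mod (data.getD kn 0) 2 == 0 then data.getD kn 0 else 0) from by
      simp [pvMaxTo, pvPe]]
  rw [show pvMaxTo (fun u => pvPe (data.getD u 0)) 0 + pvPo (data.getD (kn + 0) 0)
        = pvPe (data.getD 0 0) + (if PySem.Int.mod (data.getD kn 0) 2 != 0 then data.getD kn 0 else 0) from by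
      simp [pvMaxTo, pvPo]]
  rw [max_assoc]
  rfl

lemma pvAval (kn : Nat) (d0 : Int) (rest : List Int) (r0 : Int) (rrest : List Int)
    (hrev : (d0 :: rest).reverse = r0 :: rrest) (hkn : kn < (d0 :: rest).length) :
    solution (↑kn) (d0 :: rest)
      = pvFoldMax (fun i =>
          max (pvMaxTo (fun u => pvPo ((d0 :: rest).getD u 0)) i
                + pvMaxTo (fun u => pvPe ((r0 :: rrest).getD u 0)) ((d0 :: rest).length - kn - 1 - i))
              (pvMaxTo (fun u => pvPe ((d0 :: rest).getD u 0)) i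
                + pvMaxTo (fun u => pvPo ((r0 :: rrest).getD u 0)) ((d0 :: rest).length - kn - 1 - i)))
          0 ((d0 :: rest).length - kn) := by
  have hrr : rrest.length = (d0 :: rest).length - 1 := by
    have h := congrArg List.length hrev
    simp only [List.length_reverse, List.length_cons] at h
    simp only [List.length_cons]
    omega
  simp only [solution, PySem.List.len_eq]
  rw [hrev]
  simp only [getMaxes_true, getMaxes_false]
  rw [show ((((d0 :: rest).length : Nat) : Int) - ↑kn) = ↑((d0 :: rest).length - kn) from by omega]
  rw [PySem.List.pyRange_one]
  rw [show ((↑((d0 :: rest).length - kn) : Int) - 0).toNat = (d0 :: rest).length - kn from by simp]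
  rw [List.foldl_map]
  refine (PySem.List.foldl_congr_mem _ _
      (fun (a : Int) (u : Nat) =>
        max a (max (pvMaxTo (fun u => pvPo ((d0 :: rest).getD u 0)) u
                      + pvMaxTo (fun u => pvPe ((r0 :: rrest).getD u 0)) ((d0 :: rest).length - kn - 1 - u))
                   (pvMaxTo (fun u => pvPe ((d0 :: rest).getD u 0)) u
                      + pvMaxTo (fun u => pvPo ((r0 :: rrest).getD u 0)) ((d0 :: rest).length - kn - 1 - u))))
      _ ?_).trans ?_
  · intro acc u hu
    have hum : u < (d0 :: rest).length - kn := List.mem_range.mp hu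
    have hu_n : u < (d0 :: rest).length := by omega
    have hscanlenE : (pvScan pvPe (pvPe r0) rrest).length = (d0 :: rest).length := by
      rw [pvScan_length]; omega
    have hscanlenO : (pvScan pvPo (pvPo r0) rrest).length = (d0 :: rest).length := by
      rw [pvScan_length]; omega
    have hidx : u + kn < (d0 :: rest).length := by omega
    simp only [zero_add]
    rw [show ((↑u : Int) + ↑kn) = ((↑(u + kn) : Nat) : Int) from by push_cast; ring]
    simp only [PySem.List.pyGetD_natCast]
    rw [pvGetD_reverse _ _ (by rw [hscanlenE]; exact hidx),
        pvGetD_reverse _ _ (by rw [hscanlenO]; exact hidx)]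
    rw [hscanlenE, hscanlenO]
    rw [pvScan_getD_eq pvPo d0 rest u hu_n, pvScan_getD_eq pvPe d0 rest u hu_n]
    rw [pvScan_getD_eq pvPe r0 rrest _ (by simp only [List.length_cons, hrr]; omega), pvScan_getD_eq pvPo r0 rrest _ (by simp only [List.length_cons, hrr]; omega)]
    rw [show (d0 :: rest).length - 1 - (u + kn) = (d0 :: rest).length - kn - 1 - u from by omega]
    rw [max_assoc]
  · rfl

lemma solution_eq_alt (k : Int) (data : List Int) (hne : data ≠ []) (hk : 0 ≤ k) :
    solution k data = solution_alt k data := by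
  obtain ⟨d0, rest, rfl⟩ : ∃ d0 rest, data = d0 :: rest := by
    cases data with
    | nil => exact absurd rfl hne
    | cons a l => exact ⟨a, l, rfl⟩
  obtain ⟨kn, rfl⟩ : ∃ kn : Nat, k = (kn : Int) := ⟨k.toNat, (Int.toNat_of_nonneg hk).symm⟩
  by_cases hkn : (d0 :: rest).length ≤ kn
  · simp only [solution, solution_alt, PySem.List.len_eq]
    rw [PySem.List.pyRange_one_eq_nil (show (((d0 :: rest).length : Nat) : Int) - ↑kn ≤ 0 from by omega),
        PySem.List.pyRange_one_eq_nil (show (((d0 :: rest).length : Nat) : Int) ≤ ↑kn from by exact_mod_cast hkn)]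
    rfl
  · rw [not_le] at hkn
    obtain ⟨r0, rrest, hrev⟩ : ∃ r0 rrest, (d0 :: rest).reverse = r0 :: rrest := by
      cases h : (d0 :: rest).reverse with
      | nil => exact absurd h (by simp)
      | cons a l => exact ⟨a, l, rfl⟩
    rw [pvAval kn d0 rest r0 rrest hrev hkn, pvBval kn (d0 :: rest) hkn, pvCore]
    apply pvFoldMax_congr
    intro i hi
    have hgE : ((r0 :: rrest).getD ((d0 :: rest).length - kn - 1 - i) 0) = (d0 :: rest).getD (kn + i) 0 := by
      rw [← hrev, pvGetD_reverse _ _ (by simp only [List.length_cons]; omega)]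
      congr 1
      omega
    rw [hgE]

-- ===== VERDICT (by name: the statement is the Claim_ definition above) =====
theorem solution_spec : Claim_equal_solution := by
  intro k data _ hpre
  unfold Spec_solution
  exact solution_eq_alt k data hpre.1 hpre.2
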